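-- pv_equiv track=rewrite | github.com/autumnjolitz/instruct | instruct/utils.py | invert_mapping
-- ===== SOURCE A (Python) =====
-- def invert_mapping(mapping):
--     inverted = {}
--     for key, value in mapping.items():
--         try:
--             inverted[value].append(key)
--         except KeyError:
--             inverted[value] = [key]
--     return {key: tuple(value) for key, value in inverted.items()}
-- ===== SOURCE B (Python) =====
-- def invert_mapping(mapping):
--     distinct = dict.fromkeys(mapping.values())
--     return {
--         v: tuple(k for k, vv in mapping.items() if vv == v)
--         for v in distinct
--     }
-- ===== Notes on version B (the rewrite author's own statement) =====
-- stated objective: simpler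
-- what changed: Instead of A's single pass that incrementally builds a value->list index with try/except, B first computes the distinct values in first-appearance order via dict.fromkeys and then rescans the whole mapping once per distinct value, collecting the matching keys with a comprehension.
import Mathlib
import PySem

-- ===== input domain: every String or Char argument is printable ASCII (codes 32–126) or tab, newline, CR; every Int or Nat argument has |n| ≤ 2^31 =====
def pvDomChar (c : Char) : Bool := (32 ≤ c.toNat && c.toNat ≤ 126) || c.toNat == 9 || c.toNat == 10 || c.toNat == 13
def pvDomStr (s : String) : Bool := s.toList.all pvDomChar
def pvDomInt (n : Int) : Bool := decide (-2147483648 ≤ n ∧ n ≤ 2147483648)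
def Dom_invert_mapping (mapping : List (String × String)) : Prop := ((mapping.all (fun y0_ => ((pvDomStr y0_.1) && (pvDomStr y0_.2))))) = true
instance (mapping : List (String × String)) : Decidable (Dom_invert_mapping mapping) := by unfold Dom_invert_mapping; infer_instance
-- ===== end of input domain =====

-- B replaces A's incremental try/except index-building pass by computing the distinct
-- values first and rescanning the mapping once per distinct value (objective: simpler).

-- ===== PORT A =====
-- 'try: inverted[value].append(key) except KeyError: inverted[value] = [key]' is exactly
-- Dict.modify value [] (· ++ [key]): an existing key keeps its position, a new key appends.
-- The final '{key: tuple(value) for key, value in inverted.items()}' rebuilds the dict from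
-- its own (distinct-keyed) items, turning each list into a tuple: the items map below.
def invert_mapping (mapping : List (String × String)) : List (String × List String) :=
  ((mapping.foldl (fun d p => d.modify p.2 [] (· ++ [p.1]))
      (PySem.Dict.empty : PySem.Dict String (List String))).items).map (fun p => (p.1, p.2))

-- ===== PORT B =====
-- distinct = dict.fromkeys(mapping.values()): distinct values in first-appearance order;
-- then {v: tuple(k for k, vv in mapping.items() if vv == v) for v in distinct}.
def invert_mapping_alt (mapping : List (String × String)) : List (String × List String) :=
  (PySem.Set.ofList (mapping.map (fun p => p.2))).map
    (fun v => (v, (mapping.filter (fun p => p.2 == v)).map (fun p => p.1)))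

-- ===== PRECONDITION & SPEC =====
def Spec_invert_mapping (mapping : List (String × String)) (out : List (String × List String)) : Prop := out = invert_mapping_alt mapping
instance (mapping : List (String × String)) (out : List (String × List String)) : Decidable (Spec_invert_mapping mapping out) := by unfold Spec_invert_mapping; infer_instance

-- ===== CLAIM (what is proved, stated in full; the proofs are below) =====
def Claim_equal_invert_mapping : Prop := ∀ (mapping : List (String × String)), Dom_invert_mapping mapping → Spec_invert_mapping mapping (invert_mapping mapping)

-- ===== LEMMAS AND PROOFS =====

-- A's fold, with the key/value roles PySem's grouping lemmas use (key first).
theorem invert_fold_swap (mapping : List (String × String)) :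
    mapping.foldl (fun d p => d.modify p.2 [] (· ++ [p.1]))
        (PySem.Dict.empty : PySem.Dict String (List String))
      = (mapping.map Prod.swap).foldl (fun d p => d.modify p.1 [] (· ++ [p.2]))
          PySem.Dict.empty := by
  rw [List.foldl_map]
  simp only [Prod.fst_swap, Prod.snd_swap]

theorem invert_keys (mapping : List (String × String)) :
    ((mapping.map Prod.swap).foldl (fun d p => d.modify p.1 [] (· ++ [p.2]))
        (PySem.Dict.empty : PySem.Dict String (List String))).keys
      = PySem.Set.ofList (mapping.map (fun p => p.2)) := by
  refine (PySem.Dict.keys_foldl_modify_key (mapping.map Prod.swap)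
      (fun p : String × String => p.1) ([] : List String)
      (fun _ p => (· ++ [p.2])) PySem.Dict.empty).trans ?_
  simp [PySem.Dict.keys_empty, PySem.Set.update_nil_left, List.map_map, Function.comp_def]

theorem invert_nodup (mapping : List (String × String)) :
    ((mapping.map Prod.swap).foldl (fun d p => d.modify p.1 [] (· ++ [p.2]))
        (PySem.Dict.empty : PySem.Dict String (List String))).keys.Nodup :=
  PySem.Dict.nodup_keys_foldl_modify_key (mapping.map Prod.swap)
    (fun p : String × String => p.1) ([] : List String)
    (fun _ p => (· ++ [p.2])) PySem.Dict.empty PySem.Dict.nodup_keys_empty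

theorem invert_getD (mapping : List (String × String)) (v : String) :
    ((mapping.map Prod.swap).foldl (fun d p => d.modify p.1 [] (· ++ [p.2]))
        (PySem.Dict.empty : PySem.Dict String (List String))).getD v []
      = (mapping.filter (fun p => p.2 == v)).map (fun p => p.1) := by
  refine (PySem.Dict.getD_foldl_modify_append (mapping.map Prod.swap) PySem.Dict.empty v).trans ?_
  simp [PySem.Dict.getD_empty, List.filter_map, List.map_map, Function.comp_def]

-- ===== VERDICT (by name: the statement is the Claim_ definition above) =====
theorem invert_mapping_spec : Claim_equal_invert_mapping := by
  intro mapping _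
  unfold Spec_invert_mapping invert_mapping invert_mapping_alt
  rw [invert_fold_swap,
      PySem.Dict.items_eq_map_keys _ (invert_nodup mapping) ([] : List String),
      invert_keys]
  simp only [List.map_map, Function.comp_def]
  refine List.map_congr_left ?_
  intro v _
  rw [invert_getD]
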